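-- pv_equiv track=rewrite | github.com/marioahn/Algorithm-programmers-and-baekjoon | 프로그래머스/2/42586. 기능개발/기능개발.py | solution
-- ===== SOURCE A (Python) =====
-- import math
--
-- def solution(progresses, speeds):
--     deadline = []
--     for x,y in zip(progresses, speeds):
--         deadline.append(math.ceil((100-x)/y))
--
--     if len(deadline) == 1: return [1]
--
--     result = []
--     start, end = 0, 0
--     for idx in range(len(deadline)-1): # 아 근데, deadline길이가 1개면 안돌아가지
--         if deadline[start] >= deadline[idx+1]: # deadline[idx]가 아니라, deadline[start]!
--             end += 1
--         else:
--             result.append(end-start+1)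
--             start, end = idx+1, idx+1
--         if end == len(deadline)-1:
--             result.append(end-start+1)
--     return result
-- ===== SOURCE B (Python) =====
-- import math
-- from itertools import accumulate
--
-- def solution(progresses, speeds):
--     deadline = [math.ceil((100 - x) / y) for x, y in zip(progresses, speeds)]
--     prefix_max = list(accumulate(deadline, max))
--     n = len(deadline)
--     # a deployment starts a new group exactly when its deadline exceeds every earlier one
--     starts = [i for i in range(n) if i == 0 or deadline[i] > prefix_max[i - 1]]
--     return [b - a for a, b in zip(starts, starts[1:] + [n])]
-- ===== Notes on version B (the rewrite author's own statement) =====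
-- stated objective: alternative
-- what changed: Replaces A's stateful left-to-right grouping scan (start/end cursors, len==1 special case, in-loop final append) by a closed characterization: a deployment starts a new group iff its deadline exceeds every earlier deadline, so B builds the prefix-maximum list with itertools.accumulate, collects those boundary indices, and returns adjacent differences of the boundary list.
import Mathlib
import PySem

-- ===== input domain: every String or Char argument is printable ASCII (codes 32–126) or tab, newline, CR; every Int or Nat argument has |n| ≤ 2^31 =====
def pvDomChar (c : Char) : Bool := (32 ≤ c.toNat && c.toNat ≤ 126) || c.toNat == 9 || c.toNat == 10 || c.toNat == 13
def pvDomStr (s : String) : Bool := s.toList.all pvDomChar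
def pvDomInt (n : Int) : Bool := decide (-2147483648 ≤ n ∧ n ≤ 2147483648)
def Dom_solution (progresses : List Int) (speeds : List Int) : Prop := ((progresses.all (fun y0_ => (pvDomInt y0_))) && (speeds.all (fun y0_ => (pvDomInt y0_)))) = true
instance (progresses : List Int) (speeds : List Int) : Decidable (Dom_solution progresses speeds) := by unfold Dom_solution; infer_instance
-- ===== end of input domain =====

-- B replaces A's stateful left-to-right grouping scan by a non-grouping characterization:
-- a deployment starts a new group iff its deadline exceeds every earlier deadline, so B builds
-- the prefix-maximum list, collects those boundary indices, and returns adjacent differences.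

-- ===== PORT A =====
-- math.ceil((100-x)/y) is exact as ceiling division -((x-100)//y) here: on Dom both operands
-- have magnitude < 2^53, so the float quotient never rounds across an integer.
def ceilDeadline (p : Int × Int) : Int := -(PySem.Int.floordiv (p.1 - 100) p.2)

-- one iteration of A's `for idx in range(len(deadline)-1)` loop, state (result, start, end)
def stepA (d : List Int) (acc : List Int × Int × Int) (idx : Int) : List Int × Int × Int :=
  let acc2 : List Int × Int × Int :=
    if PySem.List.pyGetD d acc.2.1 0 ≥ PySem.List.pyGetD d (idx + 1) 0 then
      (acc.1, acc.2.1, acc.2.2 + 1)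
    else
      (acc.1 ++ [acc.2.2 - acc.2.1 + 1], idx + 1, idx + 1)
  if acc2.2.2 = (d.length : Int) - 1 then
    (acc2.1 ++ [acc2.2.2 - acc2.2.1 + 1], acc2.2.1, acc2.2.2)
  else acc2

def solution (progresses : List Int) (speeds : List Int) : List Int :=
  let deadline := (List.zip progresses speeds).map ceilDeadline
  if deadline.length = 1 then [1]
  else
    ((PySem.List.pyRange 0 ((deadline.length : Int) - 1) 1).foldl (stepA deadline) ([], 0, 0)).1

-- ===== PORT B =====
-- itertools.accumulate(deadline, max): running maxima after the first element
def accMax (m : Int) : List Int → List Int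
  | [] => []
  | y :: ys => max m y :: accMax (max m y) ys

def prefixMax : List Int → List Int
  | [] => []
  | x :: ms => x :: accMax x ms

def solution_alt (progresses : List Int) (speeds : List Int) : List Int :=
  let deadline := (List.zip progresses speeds).map ceilDeadline
  let prefix_max := prefixMax deadline
  let n : Int := deadline.length
  let starts := (PySem.List.pyRange 0 n 1).filter
    (fun i => i == 0 || decide (PySem.List.pyGetD deadline i 0 > PySem.List.pyGetD prefix_max (i - 1) 0))
  (starts.zip (starts.drop 1 ++ [n])).map (fun q => q.2 - q.1)

-- ===== PRECONDITION & SPEC =====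
-- A raises ZeroDivisionError when some speed paired with a progress is 0; excluded.
def Pre_solution (progresses : List Int) (speeds : List Int) : Prop :=
  ∀ p ∈ List.zip progresses speeds, p.2 ≠ 0

instance (progresses : List Int) (speeds : List Int) : Decidable (Pre_solution progresses speeds) := by
  unfold Pre_solution; infer_instance

def pvWitness_solution : List Int × List Int := ([93, 30, 55], [1, 30, 5])

def Spec_solution (progresses : List Int) (speeds : List Int) (out : List Int) : Prop := out = solution_alt progresses speeds
instance (progresses : List Int) (speeds : List Int) (out : List Int) : Decidable (Spec_solution progresses speeds out) := by unfold Spec_solution; infer_instance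

-- ===== CLAIM (what is proved, stated in full; the proofs are below) =====
def Claim_equal_solution : Prop := ∀ (progresses : List Int) (speeds : List Int), Dom_solution progresses speeds → Pre_solution progresses speeds → Spec_solution progresses speeds (solution progresses speeds)

-- ===== LEMMAS AND PROOFS =====

-- reference group sizes: counts of the tail under the current leader
def counts (L cnt : Int) (rest : List Int) : List Int :=
  match rest with
  | [] => [cnt]
  | x :: xs => if x ≤ L then counts L (cnt + 1) xs else cnt :: counts x 1 xs

-- accumulator form A's fold is shown equal to
def scanG (leader : Int) (cnt : Int) (rest : List Int) (result : List Int) : List Int :=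
  match rest with
  | [] => result ++ [cnt]
  | x :: xs => if x ≤ leader then scanG leader (cnt + 1) xs result else scanG x 1 xs (result ++ [cnt])

theorem scanG_eq_counts (rest : List Int) : ∀ (L cnt : Int) (res : List Int),
    scanG L cnt rest res = res ++ counts L cnt rest := by
  induction rest with
  | nil => intro L cnt res; simp [scanG, counts]
  | cons x xs ih =>
      intro L cnt res
      by_cases h : x ≤ L
      · simp [scanG, counts, h, ih]
      · simp [scanG, counts, h, ih]

-- boundary positions of rest (absolute position p) w.r.t. running maximum m
def bnds (m : Int) (rest : List Int) (p : Int) : List Int :=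
  match rest with
  | [] => []
  | y :: ys => if m < y then p :: bnds y ys (p + 1) else bnds m ys (p + 1)

-- adjacent differences, closing with n (B's zip(starts, starts[1:] + [n]))
def diffsOf (l : List Int) (n : Int) : List Int :=
  (l.zip (l.drop 1 ++ [n])).map (fun q => q.2 - q.1)

theorem diffsOf_single (a n : Int) : diffsOf [a] n = [n - a] := by
  simp [diffsOf]

theorem diffsOf_cons (a b n : Int) (t : List Int) :
    diffsOf (a :: b :: t) n = (b - a) :: diffsOf (b :: t) n := by
  simp [diffsOf]

theorem diffsOf_bnds (rest : List Int) : ∀ (L s p : Int),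
    diffsOf (s :: bnds L rest p) (p + (rest.length : Int)) = counts L (p - s) rest := by
  induction rest with
  | nil => intro L s p; simp [bnds, counts, diffsOf_single]
  | cons x xs ih =>
      intro L s p
      by_cases h : x ≤ L
      · have hb : bnds L (x :: xs) p = bnds L xs (p + 1) := by
          rw [bnds, if_neg (by omega)]
        rw [hb]
        have harith : p + ((x :: xs).length : Int) = (p + 1) + (xs.length : Int) := by
          push_cast [List.length_cons]; ring
        rw [harith, ih L s (p + 1)]
        have : (p + 1) - s = (p - s) + 1 := by ring
        rw [this]
        simp [counts, h]
      · have hb : bnds L (x :: xs) p = p :: bnds x xs (p + 1) := by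
          rw [bnds, if_pos (by omega)]
        rw [hb, diffsOf_cons]
        have harith : p + ((x :: xs).length : Int) = (p + 1) + (xs.length : Int) := by
          push_cast [List.length_cons]; ring
        rw [harith, ih x p (p + 1)]
        simp [counts, h]

-- the boundary filter over Nat indices equals bnds (shifted by the offset p)
theorem filter_range_eq_bnds (ms : List Int) : ∀ (m : Int) (p : Int),
    ((List.range ms.length).filter
        (fun i => decide (ms.getD i 0 > (m :: accMax m ms).getD i 0))).map (fun (i : Nat) => (i : Int) + p)
      = bnds m ms p := by
  induction ms with
  | nil => intro m p; simp [bnds]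
  | cons y ys ih =>
      intro m p
      rw [List.length_cons, List.range_succ_eq_map, List.filter_cons]
      have htail :
          (List.filter (fun i => decide ((y :: ys).getD i 0 > (m :: accMax m (y :: ys)).getD i 0))
              ((List.range ys.length).map Nat.succ))
            = ((List.range ys.length).filter
                (fun i => decide (ys.getD i 0 > (max m y :: accMax (max m y) ys).getD i 0))).map Nat.succ := by
        rw [List.filter_map]
        congr 1
      have hmap : ∀ (L : List Nat) (q : Int),
          (L.map Nat.succ).map (fun (i : Nat) => (i : Int) + q) = L.map (fun (i : Nat) => (i : Int) + (q + 1)) := by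
        intro L q
        rw [List.map_map]
        apply List.map_congr_left
        intro i _
        simp only [Function.comp_apply]
        push_cast; ring
      by_cases h : m < y
      · have hm : max m y = y := max_eq_right (le_of_lt h)
        rw [if_pos (by simp [h])]
        rw [htail, hm, List.map_cons, hmap, ih y (p + 1), bnds, if_pos h]
        norm_num
      · have hm : max m y = m := max_eq_left (by omega)
        rw [if_neg (by simp; omega)]
        rw [htail, hm, hmap, ih m (p + 1), bnds, if_neg h]

-- B's starts list for a nonempty deadline list is 0 :: bnds x ms 1
theorem starts_eq (x : Int) (ms : List Int) :
    (PySem.List.pyRange 0 (((x :: ms).length : Int)) 1).filter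
        (fun i => i == 0 || decide (PySem.List.pyGetD (x :: ms) i 0 >
                                    PySem.List.pyGetD (prefixMax (x :: ms)) (i - 1) 0))
      = 0 :: bnds x ms 1 := by
  rw [PySem.List.pyRange_one, List.filter_map]
  have hnat : (((x :: ms).length : Int) - 0).toNat = ms.length + 1 := by simp
  rw [hnat, List.range_succ_eq_map, List.filter_cons]
  rw [if_pos (by simp)]
  simp only [Function.comp_def]
  have htail :
      (List.filter (fun i => ((0 : Int) + ((i : Nat) : Int)) == 0 ||
          decide (PySem.List.pyGetD (x :: ms) ((0 : Int) + ((i : Nat) : Int)) 0 >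
                  PySem.List.pyGetD (prefixMax (x :: ms)) (((0 : Int) + ((i : Nat) : Int)) - 1) 0))
          ((List.range ms.length).map Nat.succ))
        = ((List.range ms.length).filter
            (fun i => decide (ms.getD i 0 > (x :: accMax x ms).getD i 0))).map Nat.succ := by
    rw [List.filter_map]
    congr 1
    apply List.filter_congr
    intro i _
    simp only [Function.comp_def]
    have h1 : ((0 : Int) + ((Nat.succ i : Nat) : Int)) = ((i + 1 : Nat) : Int) := by push_cast; ring
    rw [h1]
    have hne : (((i + 1 : Nat) : Int) == 0) = false := by
      simp only [beq_eq_false_iff_ne, ne_eq]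
      push_cast; omega
    rw [hne, Bool.false_or]
    rw [show ((i + 1 : Nat) : Int) - 1 = ((i : Nat) : Int) by push_cast; ring]
    rw [PySem.List.pyGetD_natCast, PySem.List.pyGetD_natCast]
    simp [prefixMax]
  rw [htail]
  rw [List.map_cons, List.map_map]
  have hmap : ((List.range ms.length).filter
        (fun i => decide (ms.getD i 0 > (x :: accMax x ms).getD i 0))).map
          ((fun k : Nat => (0 : Int) + (k : Int)) ∘ Nat.succ)
      = ((List.range ms.length).filter
        (fun i => decide (ms.getD i 0 > (x :: accMax x ms).getD i 0))).map (fun i : Nat => (i : Int) + 1) := by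
    apply List.map_congr_left
    intro i _
    simp
  rw [hmap, filter_range_eq_bnds ms x 1]
  norm_num

-- A's indexed fold computes scanG: invariant over the remaining index range
theorem foldA_eq_scanG (d : List Int) (k : Nat) (j start : Nat) (res : List Int)
    (hk : j + k + 2 = d.length) (hs : start ≤ j) :
    ((PySem.List.pyRange (j : Int) ((d.length : Int) - 1) 1).foldl (stepA d) (res, (start : Int), (j : Int))).1
      = scanG (d.getD start 0) ((j : Int) - (start : Int) + 1) (d.drop (j + 1)) res := by
  induction k generalizing j start res with
  | zero =>
      have hjlt : (j : Int) < (d.length : Int) - 1 := by omega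
      rw [PySem.List.pyRange_one_cons hjlt]
      simp only [List.foldl_cons]
      have hget1 : PySem.List.pyGetD d ((j : Int) + 1) 0 = d.getD (j + 1) 0 := by
        rw [PySem.List.pyGetD_eq_getElem d 0 (by omega) (by omega),
            List.getD_eq_getElem d 0 (by omega)]
        congr 1
      have hgets : PySem.List.pyGetD d ((start : Nat) : Int) 0 = d.getD start 0 := by
        rw [PySem.List.pyGetD_eq_getElem d 0 (by omega) (by omega),
            List.getD_eq_getElem d 0 (by omega)]
        congr 1
      have hdrop : d.drop (j + 1) = d.getD (j + 1) 0 :: d.drop (j + 2) := by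
        rw [List.getD_eq_getElem d 0 (by omega)]
        rw [List.drop_eq_getElem_cons (by omega)]
      have hdrop2 : d.drop (j + 2) = [] := by
        apply List.drop_eq_nil_of_le; omega
      have hlast : ((j : Int) + 1) = (d.length : Int) - 1 := by omega
      have hnil : PySem.List.pyRange ((j : Int) + 1) ((d.length : Int) - 1) 1 = [] :=
        PySem.List.pyRange_one_eq_nil (by omega)
      by_cases hc : d.getD (j + 1) 0 ≤ d.getD start 0
      · have hstep : stepA d (res, (start : Int), (j : Int)) (j : Int)
            = (res ++ [(j : Int) + 1 - (start : Int) + 1], (start : Int), (j : Int) + 1) := by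
          simp only [stepA, hget1, hgets, ge_iff_le, if_pos hc, if_pos hlast]
        rw [hstep, hnil]
        simp only [List.foldl_nil]
        rw [hdrop]
        simp only [scanG, if_pos hc, hdrop2]
        congr 2
        ring
      · have hstep : stepA d (res, (start : Int), (j : Int)) (j : Int)
            = (res ++ [(j : Int) - (start : Int) + 1] ++ [1], (j : Int) + 1, (j : Int) + 1) := by
          simp only [stepA, hget1, hgets, ge_iff_le, if_neg hc, if_pos hlast]
          norm_num
        rw [hstep, hnil]
        simp only [List.foldl_nil]
        rw [hdrop]
        simp only [scanG, if_neg hc, hdrop2, scanG]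
  | succ k ih =>
      have hjlt : (j : Int) < (d.length : Int) - 1 := by omega
      rw [PySem.List.pyRange_one_cons hjlt]
      simp only [List.foldl_cons]
      have hj1 : ((j : Int) + 1) = ((j + 1 : Nat) : Int) := by push_cast; ring
      have hget1 : PySem.List.pyGetD d ((j : Int) + 1) 0 = d.getD (j + 1) 0 := by
        rw [PySem.List.pyGetD_eq_getElem d 0 (by omega) (by omega),
            List.getD_eq_getElem d 0 (by omega)]
        congr 1
      have hgets : PySem.List.pyGetD d ((start : Nat) : Int) 0 = d.getD start 0 := by
        rw [PySem.List.pyGetD_eq_getElem d 0 (by omega) (by omega),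
            List.getD_eq_getElem d 0 (by omega)]
        congr 1
      have hdrop : d.drop (j + 1) = d.getD (j + 1) 0 :: d.drop (j + 2) := by
        rw [List.getD_eq_getElem d 0 (by omega)]
        rw [List.drop_eq_getElem_cons (by omega)]
      have hlast : ¬ (((j : Int) + 1) = (d.length : Int) - 1) := by omega
      by_cases hc : d.getD (j + 1) 0 ≤ d.getD start 0
      · have hstep : stepA d (res, (start : Int), (j : Int)) (j : Int)
            = (res, (start : Int), (j : Int) + 1) := by
          simp only [stepA, hget1, hgets, ge_iff_le, if_pos hc, if_neg hlast]
        rw [hstep, hj1, ih (j + 1) start res (by omega) (by omega)]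
        rw [hdrop]
        simp only [scanG, if_pos hc]
        congr 2
        push_cast; ring
      · have hstep : stepA d (res, (start : Int), (j : Int)) (j : Int)
            = (res ++ [(j : Int) - (start : Int) + 1], (j : Int) + 1, (j : Int) + 1) := by
          simp only [stepA, hget1, hgets, ge_iff_le, if_neg hc, if_neg hlast]
        rw [hstep, hj1, ih (j + 1) (j + 1) (res ++ [(j : Int) - (start : Int) + 1]) (by omega) (by omega)]
        rw [hdrop]
        simp only [scanG, if_neg hc]
        congr 2
        push_cast; ring

-- B's core on a nonempty deadline list computes counts x 1 ms
theorem altCore_eq_counts (x : Int) (ms : List Int) :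
    (let d := x :: ms
     let pm := prefixMax d
     let n : Int := d.length
     let starts := (PySem.List.pyRange 0 n 1).filter
       (fun i => i == 0 || decide (PySem.List.pyGetD d i 0 > PySem.List.pyGetD pm (i - 1) 0))
     (starts.zip (starts.drop 1 ++ [n])).map (fun q => q.2 - q.1))
      = counts x 1 ms := by
  simp only
  rw [starts_eq x ms]
  have hd : ((((0 : Int) :: bnds x ms 1).zip (((0 : Int) :: bnds x ms 1).drop 1 ++ [(((x :: ms).length : Int))])).map (fun q => q.2 - q.1))
      = diffsOf ((0 : Int) :: bnds x ms 1) (((x :: ms).length : Int)) := rfl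
  rw [hd]
  have hn : (((x :: ms).length : Int)) = 1 + (ms.length : Int) := by
    push_cast [List.length_cons]; ring
  rw [hn, diffsOf_bnds ms x 0 1]
  norm_num

-- core equality on an arbitrary deadline list
theorem core_eq (d : List Int) :
    (if d.length = 1 then [1]
     else ((PySem.List.pyRange 0 ((d.length : Int) - 1) 1).foldl (stepA d) ([], 0, 0)).1)
      = (let pm := prefixMax d
         let n : Int := d.length
         let starts := (PySem.List.pyRange 0 n 1).filter
           (fun i => i == 0 || decide (PySem.List.pyGetD d i 0 > PySem.List.pyGetD pm (i - 1) 0))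
         (starts.zip (starts.drop 1 ++ [n])).map (fun q => q.2 - q.1)) := by
  match d with
  | [] => simp [PySem.List.pyRange_one_eq_nil]
  | [x] =>
      rw [altCore_eq_counts x []]
      simp [counts]
  | x :: y :: rest =>
      rw [altCore_eq_counts x (y :: rest)]
      have hlen : (x :: y :: rest).length ≠ 1 := by simp
      rw [if_neg hlen]
      have h := foldA_eq_scanG (x :: y :: rest) rest.length 0 0 []
        (by simp) (le_refl 0)
      simp only [Int.natCast_zero] at h
      rw [h]
      rw [scanG_eq_counts]
      simp

-- ===== VERDICT (by name: the statement is the Claim_ definition above) =====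
theorem solution_spec : Claim_equal_solution := by
  intro progresses speeds _ _
  unfold Spec_solution solution solution_alt
  exact core_eq _
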